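-- pv_equiv track=rewrite | github.com/sha314/quantum-espresso | data_parser_new.py | read_keywords
-- ===== SOURCE A (Python) =====
-- def find_keywords(prev,line):
--     #Assumes that keywords will be "&...", "#..." or follow empty space or "/"
--     #If need to update formatting of keywords, change the if statements
--     if any("&" in s for s in line):
--         return True
--     if any("#" in s for s in line):
--         return True
--     elif any("/" in s for s in prev):
--         return True
--     elif len(prev) == 0 and len(line) != 0:
--         return True
--     else:
--         return False
--
-- def get_data_length(i, lines):
--     start = i + 1
--     while start < len(lines) and not lines[start].strip():
--         start += 1
--
--     if start >= len(lines):
--         return [], start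
--
--     data = []
--     j = start
--
--     while j < len(lines):
--         split_line = lines[j].strip().split()
--
--         # if not split_line:
--         #     j += 1
--         #     continue
--
--         if len(split_line) != 0:
--             data.append(split_line)
--             j += 1
--         else:
--             break
--
--     return data, j
--
-- def read_keywords(lines, keywords, include_keyword):
--     data_blocks = {}
--     i = 0
--     #Will turn desired data into list of lists
--
--     formatted_keywords = set(k.lower() for k in keywords)
--
--     while i < len(lines):
--         line = lines[i].strip()
--         vals = line.split()
--
--         if find_keywords(lines[i-1].strip().split() if i > 0 else [], vals):
--             formatted_vals = [v.lower().lstrip("&") for v in vals]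
--             found_keyword = formatted_keywords & set(formatted_vals)
--
--             if found_keyword:
--                 keyword = list(found_keyword)[0]
--                 data, j = get_data_length(i, lines)
--                 if include_keyword:
--                     # Store the keyword line as first entry
--                     data = [vals] + data
--
--                 data_blocks[keyword] = data
--                 i = j
--                 continue
--         i += 1
--
--     return data_blocks
-- ===== SOURCE B (Python) =====
-- def find_keywords(prev, line):
--     # same keyword-line heuristic as the original module
--     if any("&" in s for s in line):
--         return True
--     if any("#" in s for s in line):
--         return True
--     elif any("/" in s for s in prev):
--         return True
--     elif len(prev) == 0 and len(line) != 0: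
--         return True
--     else:
--         return False
--
--
-- def read_keywords(lines, keywords, include_keyword):
--     # Single flat pass over the lines with an explicit state machine
--     # (searching / awaiting first data row / collecting rows) instead of
--     # the original's inner helper with index jumps.
--     kws = set(k.lower() for k in keywords)
--     blocks = {}
--     prev = []
--     mode = 0          # 0 = searching, 1 = awaiting first data row, 2 = collecting
--     keyword = None
--     rows = []
--     for raw in lines:
--         toks = raw.strip().split()
--         if mode == 0:
--             if find_keywords(prev, toks):
--                 hit = next((v for v in (t.lower().lstrip("&") for t in toks) if v in kws), None)
--                 if hit is not None:
--                     keyword = hit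
--                     rows = [toks] if include_keyword else []
--                     mode = 1
--         elif mode == 1:
--             if toks:
--                 rows.append(toks)
--                 mode = 2
--         else:
--             if toks:
--                 rows.append(toks)
--             else:
--                 blocks[keyword] = rows
--                 mode = 0
--         prev = toks
--     if mode != 0:
--         blocks[keyword] = rows
--     return blocks
-- ===== Notes on version B (the rewrite author's own statement) =====
-- stated objective: alternative
-- what changed: read_keywords is rewritten as a single flat pass over the lines with an explicit state machine (searching / awaiting first data row / collecting rows) carrying the previous line's tokens, replacing the original's inner get_data_length helper with index jumps and re-scanning.
-- outside the precondition, e.g. on read_keywords(['alpha beta'], ['alpha', 'beta'], False): A returns {'alpha': []}, B returns {'alpha': []}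
import Mathlib
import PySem

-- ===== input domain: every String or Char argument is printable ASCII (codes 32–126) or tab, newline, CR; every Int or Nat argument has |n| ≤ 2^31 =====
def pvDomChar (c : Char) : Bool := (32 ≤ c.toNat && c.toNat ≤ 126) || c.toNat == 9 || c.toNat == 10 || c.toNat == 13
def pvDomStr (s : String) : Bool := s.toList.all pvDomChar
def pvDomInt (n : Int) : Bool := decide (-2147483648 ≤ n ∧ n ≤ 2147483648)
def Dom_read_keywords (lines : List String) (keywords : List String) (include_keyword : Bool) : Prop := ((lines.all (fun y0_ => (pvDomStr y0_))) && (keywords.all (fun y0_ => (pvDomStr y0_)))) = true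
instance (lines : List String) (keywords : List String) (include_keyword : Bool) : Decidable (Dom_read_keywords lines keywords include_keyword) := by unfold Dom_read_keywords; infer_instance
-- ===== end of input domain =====

-- B is a single flat state-machine pass (searching / awaiting data / collecting) replacing A's
-- inner helper with index jumps; same return value on Pre_ (objective: alternative decomposition).

-- ===== SHARED HELPERS (this helper code is textually identical in both Python files) =====

-- s.strip().split()
def pvToks (s : String) : List String := PySem.Str.split₀ (PySem.Str.strip s)

-- v.lower().lstrip("&"); lstrip with the one-char set "&" is exactly dropWhile (· == '&')
def pvFmt (v : String) : String :=
  String.ofList ((PySem.Str.lower v).toList.dropWhile (fun c => c == '&'))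

-- find_keywords(prev, line): same helper in Source A and Source B
def pvFindKeywords (prev line : List String) : Bool :=
  if line.any (fun s => PySem.Str.isIn "&" s) then true
  else if line.any (fun s => PySem.Str.isIn "#" s) then true
  else if prev.any (fun s => PySem.Str.isIn "/" s) then true
  else if prev.length == 0 && line.length != 0 then true
  else false

-- set(k.lower() for k in keywords)
def pvKws (keywords : List String) : PySem.Set String :=
  PySem.Set.ofList (keywords.map PySem.Str.lower)

-- ===== PORT A =====

-- first while of get_data_length: skip blank lines from `start`
def pvGdlSkip (lines : List String) (start : Nat) : Nat :=
  if h : start < lines.length then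
    if PySem.Str.strip lines[start]! == "" then pvGdlSkip lines (start + 1) else start
  else start
termination_by lines.length - start

-- second while of get_data_length: collect non-blank split rows from `j`
def pvGdlCollect (lines : List String) (j : Nat) : List (List String) × Nat :=
  if h : j < lines.length then
    let split_line := pvToks lines[j]!
    if split_line.length ≠ 0 then
      let r := pvGdlCollect lines (j + 1)
      (split_line :: r.1, r.2)
    else ([], j)
  else ([], j)
termination_by lines.length - j

def pvGetDataLength (i : Nat) (lines : List String) : List (List String) × Nat :=
  let start := pvGdlSkip lines (i + 1)
  if start ≥ lines.length then ([], start)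
  else pvGdlCollect lines start

-- bounds needed by pvLoopA's termination (cited in decreasing_by)
lemma pvGdlSkip_le (lines : List String) : ∀ s, s ≤ pvGdlSkip lines s := by
  intro s
  fun_induction pvGdlSkip lines s <;> omega

lemma pvGdlCollect_le (lines : List String) : ∀ j, j ≤ (pvGdlCollect lines j).2 := by
  intro j
  fun_induction pvGdlCollect lines j with
  | case1 j h sl hne r ih => simp only [r]; omega
  | case2 j h sl hne => simp
  | case3 j h => simp

lemma pvGetDataLength_gt (i : Nat) (lines : List String) : i < (pvGetDataLength i lines).2 := by
  have h1 := pvGdlSkip_le lines (i + 1)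
  have h2 := pvGdlCollect_le lines (pvGdlSkip lines (i + 1))
  by_cases hge : pvGdlSkip lines (i + 1) ≥ lines.length <;>
    simp [pvGetDataLength, hge] <;> omega

-- the main while loop of read_keywords
def pvLoopA (lines : List String) (kws : PySem.Set String) (inc : Bool) (i : Nat)
    (db : PySem.Dict String (List (List String))) : PySem.Dict String (List (List String)) :=
  if h : i < lines.length then
    let vals := pvToks lines[i]!
    let prev := if 0 < i then pvToks lines[i-1]! else []
    if pvFindKeywords prev vals then
      let fvals := vals.map pvFmt
      -- found_keyword = formatted_keywords & set(formatted_vals); keyword = list(found_keyword)[0].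
      -- Python's set order is unspecified; under Pre_ (at most one element in the
      -- intersection) taking it in kws order is exact.
      match (PySem.Set.inter kws (PySem.Set.ofList fvals)).head? with
      | some keyword =>
          let dj := pvGetDataLength i lines
          let data := if inc then vals :: dj.1 else dj.1
          pvLoopA lines kws inc dj.2 (db.insert keyword data)
      | none => pvLoopA lines kws inc (i + 1) db
    else pvLoopA lines kws inc (i + 1) db
  else db
termination_by lines.length - i
decreasing_by
  · have := pvGetDataLength_gt i lines; omega
  · omega
  · omega

def read_keywords (lines : List String) (keywords : List String) (include_keyword : Bool) :
    List (String × List (List String)) :=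
  (pvLoopA lines (pvKws keywords) include_keyword 0 PySem.Dict.empty).items

-- ===== PORT B =====

-- the single for-loop of Source B: state = (prev tokens, mode, current keyword, accumulated rows)
-- mode 0 = searching, 1 = awaiting first data row, 2 = collecting rows
def pvLoopB (kws : PySem.Set String) (inc : Bool) (l : List String) (prev : List String)
    (mode : Nat) (kw : String) (rows : List (List String))
    (blocks : PySem.Dict String (List (List String))) : PySem.Dict String (List (List String)) :=
  match l with
  | [] =>
      if mode ≠ 0 then blocks.insert kw rows else blocks
  | raw :: rest =>
      let toks := pvToks raw
      if mode == 0 then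
        if pvFindKeywords prev toks then
          match (toks.map pvFmt).find? (fun v => PySem.Set.contains kws v) with
          | some hit => pvLoopB kws inc rest toks 1 hit (if inc then [toks] else []) blocks
          | none => pvLoopB kws inc rest toks 0 kw rows blocks
        else pvLoopB kws inc rest toks 0 kw rows blocks
      else if mode == 1 then
        if toks.length ≠ 0 then pvLoopB kws inc rest toks 2 kw (rows ++ [toks]) blocks
        else pvLoopB kws inc rest toks 1 kw rows blocks
      else
        if toks.length ≠ 0 then pvLoopB kws inc rest toks 2 kw (rows ++ [toks]) blocks
        else pvLoopB kws inc rest toks 0 kw rows (blocks.insert kw rows)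

def read_keywords_alt (lines : List String) (keywords : List String) (include_keyword : Bool) :
    List (String × List (List String)) :=
  (pvLoopB (pvKws keywords) include_keyword lines [] 0 "" [] PySem.Dict.empty).items

-- ===== PRECONDITION & SPEC =====
-- Pre_ excludes inputs where some line's formatted tokens match two or more distinct keywords:
-- there A picks the committed keyword via list(set & set)[0], whose order is Python's
-- randomized hash order, so no deterministic value can be specified.
def Pre_read_keywords (lines : List String) (keywords : List String) (include_keyword : Bool) : Prop :=
  ∀ s ∈ lines,
    (PySem.Set.inter (pvKws keywords) (PySem.Set.ofList ((pvToks s).map pvFmt))).length ≤ 1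

instance (lines : List String) (keywords : List String) (include_keyword : Bool) :
    Decidable (Pre_read_keywords lines keywords include_keyword) := by
  unfold Pre_read_keywords; infer_instance

def pvWitness_read_keywords : List String × List String × Bool :=
  (["&control", " 1 2 ", "", "x / y"], ["control", "ions"], true)

def Spec_read_keywords (lines : List String) (keywords : List String) (include_keyword : Bool)
    (out : List (String × List (List String))) : Prop :=
  out = read_keywords_alt lines keywords include_keyword

instance (lines : List String) (keywords : List String) (include_keyword : Bool)
    (out : List (String × List (List String))) : Decidable (Spec_read_keywords lines keywords include_keyword out) := by
  unfold Spec_read_keywords; infer_instance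

-- ===== CLAIM (what is proved, stated in full; the proofs are below) =====
def Claim_equal_read_keywords : Prop := ∀ (lines : List String) (keywords : List String) (include_keyword : Bool), Dom_read_keywords lines keywords include_keyword → Pre_read_keywords lines keywords include_keyword → Spec_read_keywords lines keywords include_keyword (read_keywords lines keywords include_keyword)

-- ===== LEMMAS AND PROOFS =====

lemma pvWitness_ok :
    Dom_read_keywords pvWitness_read_keywords.1 pvWitness_read_keywords.2.1 pvWitness_read_keywords.2.2 ∧
    Pre_read_keywords pvWitness_read_keywords.1 pvWitness_read_keywords.2.1 pvWitness_read_keywords.2.2 := by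
  constructor <;> decide

-- a blank line has no tokens
lemma pvToks_eq_nil (s : String) (h : PySem.Str.strip s = "") : pvToks s = [] := by
  unfold pvToks; rw [h]; rfl

-- split₀.go never returns [] if fed a pending word, a nonempty accumulator or a non-space char
lemma pvGo_ne_nil : ∀ (s cur acc : _),
    (cur ≠ [] ∨ acc ≠ [] ∨ (∃ c ∈ s, ¬ PySem.Chars.isspace c)) →
    PySem.Chars.split₀.go s cur acc ≠ [] := by
  intro s
  induction s with
  | nil =>
      intro cur acc h
      rw [PySem.Chars.split₀.go]
      rcases h with h | h | h
      · simp [List.isEmpty_iff, h]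
      · by_cases hc : cur.isEmpty <;> simp [hc, h]
      · simp at h
  | cons c rest ih =>
      intro cur acc h
      rw [PySem.Chars.split₀.go]
      by_cases hs : PySem.Chars.isspace c
      · simp only [hs, if_true]
        by_cases hc : cur.isEmpty
        · simp only [hc, if_true]
          refine ih _ _ ?_
          rcases h with h | h | h
          · exact absurd (List.isEmpty_iff.mp hc) h
          · exact Or.inr (Or.inl h)
          · rcases h with ⟨d, hd, hnd⟩
            rcases List.mem_cons.mp hd with rfl | hd'
            · exact absurd hs hnd
            · exact Or.inr (Or.inr ⟨d, hd', hnd⟩)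
        · simp only [hc, if_false]
          exact ih _ _ (Or.inr (Or.inl (by simp)))
      · simp only [hs, if_false]
        exact ih _ _ (Or.inl (by simp))

-- a non-blank line splits into at least one token
lemma pvToks_ne_nil (s : String) (h : PySem.Str.strip s ≠ "") : pvToks s ≠ [] := by
  unfold pvToks
  have htl : (PySem.Str.strip s).toList ≠ [] := by
    intro he
    exact h (by cases hst : PySem.Str.strip s <;> simp_all)
  have hstrip : (PySem.Str.strip s).toList = PySem.Chars.strip s.toList := by simp
  set cs := s.toList with hcs
  rw [hstrip] at htl
  -- head of lstrip is non-space and survives rstrip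
  have hl : PySem.Chars.lstrip cs ≠ [] := by
    intro he
    rw [PySem.Chars.strip, he] at htl
    exact htl rfl
  obtain ⟨x, t, hxt⟩ := List.exists_cons_of_ne_nil hl
  have hx : ¬ PySem.Chars.isspace x := by
    have hxt' : List.dropWhile PySem.Chars.isspace cs = x :: t := by
      rw [← PySem.Chars.lstrip]; exact hxt
    have h2 := List.head_dropWhile_not PySem.Chars.isspace (l := cs) (by simp [hxt'])
    simp only [hxt', List.head_cons] at h2
    simp [h2]
  have hex : ∃ c ∈ PySem.Chars.strip cs, ¬ PySem.Chars.isspace c := by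
    by_contra hc
    push_neg at hc
    have hxl : x ∈ PySem.Chars.lstrip cs := by rw [hxt]; simp
    have hxr : x ∈ (PySem.Chars.lstrip cs).reverse := by simpa using hxl
    rw [← List.takeWhile_append_dropWhile (p := PySem.Chars.isspace)
      (l := (PySem.Chars.lstrip cs).reverse)] at hxr
    rcases List.mem_append.mp hxr with hmem | hmem
    · exact hx (List.mem_takeWhile_imp hmem)
    · refine hx (hc x ?_)
      rw [PySem.Chars.strip, PySem.Chars.rstrip]
      simpa using hmem
  intro hnil
  have : PySem.Chars.split₀ (PySem.Chars.strip cs) ≠ [] := by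
    rw [PySem.Chars.split₀]
    exact pvGo_ne_nil _ _ _ (Or.inr (Or.inr hex))
  apply this
  have hb : (PySem.Str.split₀ (PySem.Str.strip s)) =
      (PySem.Chars.split₀ (PySem.Chars.strip cs)).map String.ofList := by
    rw [PySem.Str.split₀, hstrip]
  rw [hb] at hnil
  simpa using hnil

-- where pvGdlSkip stops (below the end) the line is non-blank
lemma pvGdlSkip_stop (lines : List String) : ∀ s, pvGdlSkip lines s < lines.length →
    PySem.Str.strip lines[pvGdlSkip lines s]! ≠ "" := by
  intro s
  fun_induction pvGdlSkip lines s with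
  | case1 s h hb ih => exact ih
  | case2 s h hb => intro _; simpa using hb
  | case3 s h => omega

-- where pvGdlCollect stops (below the end) the line is blank (has no tokens)
lemma pvGdlCollect_stop (lines : List String) : ∀ j, (pvGdlCollect lines j).2 < lines.length →
    pvToks lines[(pvGdlCollect lines j).2]! = [] := by
  intro j
  fun_induction pvGdlCollect lines j with
  | case1 j h sl hne r ih => simp only [r]; exact ih
  | case2 j h sl hne => intro _; simp only [sl] at hne; simpa using hne
  | case3 j h => intro hh; omega

-- pvGdlCollect never runs past the end of the list
lemma pvGdlCollect_le_len (lines : List String) : ∀ j, j ≤ lines.length →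
    (pvGdlCollect lines j).2 ≤ lines.length := by
  intro j
  fun_induction pvGdlCollect lines j with
  | case1 j h sl hne r ih => intro _; simp only [r]; exact ih (by omega)
  | case2 j h sl hne => intro _; simpa using h.le
  | case3 j h => intro hj; simpa using hj

-- A's set-intersection pick agrees with B's first-match pick when at most one
-- distinct formatted token is a keyword
lemma pvChoice_eq (kws fvals : List String)
    (h : (PySem.Set.inter kws (PySem.Set.ofList fvals)).length ≤ 1) :
    (PySem.Set.inter kws (PySem.Set.ofList fvals)).head? =
      fvals.find? (fun v => PySem.Set.contains kws v) := by
  rcases hf : fvals.find? (fun v => PySem.Set.contains kws v) with _ | v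
  · have hnone := List.find?_eq_none.mp hf
    rcases hi : PySem.Set.inter kws (PySem.Set.ofList fvals) with _ | ⟨k, t⟩
    · rfl
    · exfalso
      have hk : k ∈ PySem.Set.inter kws (PySem.Set.ofList fvals) := by rw [hi]; simp
      have hk2 := List.mem_filter.mp hk
      have hkf : k ∈ fvals := by
        have := hk2.2
        simp only [PySem.Set.contains_eq_listContains, List.contains_iff_mem] at this
        exact (PySem.Set.mem_ofList _ _).mp this
      have := hnone k hkf
      simp only [PySem.Set.contains_eq_listContains, List.contains_iff_mem] at this
      exact this hk2.1
  · have hvf : v ∈ fvals := List.mem_of_find?_eq_some hf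
    have hvk := List.find?_some hf
    have hvin : v ∈ PySem.Set.inter kws (PySem.Set.ofList fvals) := by
      refine List.mem_filter.mpr ⟨?_, ?_⟩
      · simpa [List.contains_iff_mem] using hvk
      · simp only [PySem.Set.contains_eq_listContains, List.contains_iff_mem]
        exact (PySem.Set.mem_ofList _ _).mpr hvf
    rcases hi : PySem.Set.inter kws (PySem.Set.ofList fvals) with _ | ⟨k, t⟩
    · rw [hi] at hvin; simp at hvin
    · rw [hi] at hvin h
      have ht : t = [] := by
        simp only [List.length_cons] at h
        exact List.length_eq_zero_iff.mp (by omega)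
      subst ht
      simp at hvin
      simp [hvin]

-- A's searching loop steps over a token-free line without committing anything
lemma pvLoopA_blank (lines : List String) (kws : PySem.Set String) (inc : Bool) (i : Nat)
    (db : PySem.Dict String (List (List String))) (hi : i < lines.length)
    (hb : pvToks lines[i]! = []) :
    pvLoopA lines kws inc i db = pvLoopA lines kws inc (i + 1) db := by
  rw [pvLoopA]
  simp only [hi, dif_pos, hb]
  have hint : PySem.Set.inter kws (PySem.Set.ofList (List.map pvFmt [])) = [] := by
    simp [PySem.Set.inter, PySem.Set.ofList]
  rw [hint]
  rcases hfb : pvFindKeywords (if 0 < i then pvToks lines[i-1]! else []) [] with _ | _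
  · rw [if_neg Bool.false_ne_true]
  · rw [if_pos rfl]
    simp only [List.head?_nil]

-- B's result in modes 1 and 2 does not depend on the carried prev tokens
lemma pvLoopB_prev_irrel (kws : PySem.Set String) (inc : Bool) :
    ∀ (l : List String) (m : Nat) (kw : String) (rows : List (List String))
      (db : PySem.Dict String (List (List String))) (prev prev' : List String),
      m = 1 ∨ m = 2 →
      pvLoopB kws inc l prev m kw rows db = pvLoopB kws inc l prev' m kw rows db := by
  intro l
  cases l with
  | nil => intro m kw rows db prev prev' _; rfl
  | cons raw rest =>
      intro m kw rows db prev prev' hm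
      rcases hm with rfl | rfl <;>
        · rw [pvLoopB, pvLoopB]
          simp only [show ((1:Nat) == 0) = false from rfl, show ((2:Nat) == 0) = false from rfl,
            show ((1:Nat) == 1) = true from rfl, show ((2:Nat) == 1) = false from rfl,
            Bool.false_eq_true, if_false, if_true]

-- B in mode 1 skips exactly the blank lines pvGdlSkip skips
lemma pvLoopB_skip (lines : List String) (kws : PySem.Set String) (inc : Bool) :
    ∀ (m s : Nat), lines.length - s ≤ m → s ≤ lines.length → ∀ prev kw rows db,
      pvLoopB kws inc (lines.drop s) prev 1 kw rows db =
        pvLoopB kws inc (lines.drop (pvGdlSkip lines s)) prev 1 kw rows db := by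
  intro m
  induction m with
  | zero =>
      intro s hm hs prev kw rows db
      have h : ¬ s < lines.length := by omega
      rw [pvGdlSkip, dif_neg h]
  | succ m ihm =>
      intro s hm hs prev kw rows db
      by_cases h : s < lines.length
      · by_cases hb : PySem.Str.strip lines[s]! = ""
        · have hrw : lines.drop s = lines[s]! :: lines.drop (s + 1) := by
            rw [getElem!_pos lines s h]; exact List.drop_eq_getElem_cons h
          have htoks : pvToks lines[s]! = [] := pvToks_eq_nil _ hb
          have hskip : pvGdlSkip lines s = pvGdlSkip lines (s + 1) := by
            rw [pvGdlSkip, dif_pos h, if_pos (by simpa using hb)]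
          rw [hrw, pvLoopB]
          simp only [htoks,
            show ((1:Nat) == 0) = false from rfl, show ((1:Nat) == 1) = true from rfl,
            Bool.false_eq_true, if_false, if_true]
          norm_num
          rw [pvLoopB_prev_irrel kws inc _ 1 kw rows db [] prev (Or.inl rfl)]
          rw [hskip]
          exact ihm (s + 1) (by omega) (by omega) prev kw rows db
        · have hskip : pvGdlSkip lines s = s := by
            rw [pvGdlSkip, dif_pos h, if_neg (by simpa using hb)]
          rw [hskip]
      · have hskip : pvGdlSkip lines s = s := by rw [pvGdlSkip, dif_neg h]
        rw [hskip]

-- B in mode 2 collects exactly pvGdlCollect's rows, then commits the block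
lemma pvLoopB_collect (lines : List String) (kws : PySem.Set String) (inc : Bool) :
    ∀ (m t : Nat), lines.length - t ≤ m → t ≤ lines.length → ∀ prev kw rows db,
      pvLoopB kws inc (lines.drop t) prev 2 kw rows db =
        (if (pvGdlCollect lines t).2 < lines.length then
           pvLoopB kws inc (lines.drop ((pvGdlCollect lines t).2 + 1)) [] 0 kw
             (rows ++ (pvGdlCollect lines t).1)
             (db.insert kw (rows ++ (pvGdlCollect lines t).1))
         else db.insert kw (rows ++ (pvGdlCollect lines t).1)) := by
  intro m
  induction m with
  | zero =>
      intro t hm ht prev kw rows db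
      have ht' : t = lines.length := by omega
      subst ht'
      have hcol : pvGdlCollect lines lines.length = ([], lines.length) := by
        rw [pvGdlCollect.eq_def]; simp
      rw [hcol]
      simp [List.drop_length, pvLoopB]
  | succ m ihm =>
      intro t hm ht prev kw rows db
      by_cases h : t < lines.length
      · have hrw : lines.drop t = lines[t]! :: lines.drop (t + 1) := by
          rw [getElem!_pos lines t h]; exact List.drop_eq_getElem_cons h
        by_cases hb : pvToks lines[t]! = []
        · have hb' : pvToks lines[t] = [] := by
            rw [← getElem!_pos lines t h]; exact hb
          have hcol : pvGdlCollect lines t = ([], t) := by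
            rw [pvGdlCollect.eq_def]; simp [h, hb']
          rw [hrw, pvLoopB, hcol]
          simp only [hb,
            show ((2:Nat) == 0) = false from rfl, show ((2:Nat) == 1) = false from rfl,
            Bool.false_eq_true, if_false]
          norm_num [h]
        · have hb' : ¬ pvToks lines[t] = [] := by
            rw [← getElem!_pos lines t h]; exact hb
          have hcol : pvGdlCollect lines t =
              (pvToks lines[t]! :: (pvGdlCollect lines (t + 1)).1, (pvGdlCollect lines (t + 1)).2) := by
            rw [pvGdlCollect.eq_def]; simp [h, hb', getElem!_pos lines t h]
          have hlen : (pvToks lines[t]!).length ≠ 0 := by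
            simpa [List.length_eq_zero_iff] using hb
          rw [hrw, pvLoopB, hcol]
          simp only [
            show ((2:Nat) == 0) = false from rfl, show ((2:Nat) == 1) = false from rfl,
            Bool.false_eq_true, if_false, if_pos hlen]
          rw [ihm (t + 1) (by omega) (by omega) (pvToks lines[t]!) kw (rows ++ [pvToks lines[t]!]) db]
          simp
      · have ht' : t = lines.length := by omega
        subst ht'
        have hcol : pvGdlCollect lines lines.length = ([], lines.length) := by
          rw [pvGdlCollect.eq_def]; simp
        rw [hcol]
        simp [List.drop_length, pvLoopB]

-- main equivalence of the two loops, from any searching position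
lemma pvMain (lines : List String) (kws : PySem.Set String) (inc : Bool)
    (hPre : ∀ s ∈ lines, (PySem.Set.inter kws (PySem.Set.ofList ((pvToks s).map pvFmt))).length ≤ 1) :
    ∀ (m i : Nat), lines.length - i ≤ m → i ≤ lines.length →
      ∀ kw rows db,
      pvLoopA lines kws inc i db =
        pvLoopB kws inc (lines.drop i) (if 0 < i then pvToks lines[i-1]! else []) 0 kw rows db := by
  intro m
  induction m with
  | zero =>
      intro i hm hle kw rows db
      have hi : i = lines.length := by omega
      subst hi
      rw [pvLoopA]
      simp [List.drop_length, pvLoopB]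
  | succ m ihm =>
      intro i hm hle kw rows db
      by_cases h : i < lines.length
      · have hrw : lines.drop i = lines[i]! :: lines.drop (i + 1) := by
          rw [getElem!_pos lines i h]; exact List.drop_eq_getElem_cons h
        have hmem : lines[i]! ∈ lines := by
          rw [getElem!_pos lines i h]; exact List.getElem_mem h
        have hprev1 : (if 0 < i + 1 then pvToks lines[i + 1 - 1]! else []) = pvToks lines[i]! := by
          simp
        rw [pvLoopA, hrw, pvLoopB]
        simp only [h, dif_pos, show ((0:Nat) == 0) = true from rfl, if_true]
        by_cases hf : pvFindKeywords (if 0 < i then pvToks lines[i-1]! else []) (pvToks lines[i]!)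
        · rw [if_pos hf, if_pos hf]
          rw [pvChoice_eq kws ((pvToks lines[i]!).map pvFmt) (hPre lines[i]! hmem)]
          rcases hk : ((pvToks lines[i]!).map pvFmt).find? (fun v => PySem.Set.contains kws v)
            with _ | k
          · simp only []
            have := ihm (i + 1) (by omega) (by omega) kw rows db
            rw [hprev1] at this
            exact this
          · simp only []
            -- keyword found: A jumps over the whole block, B walks through it
            set rows0 := (if inc then [pvToks lines[i]!] else []) with hrows0
            set start := pvGdlSkip lines (i + 1) with hstart
            have hstart_ge : i + 1 ≤ start := pvGdlSkip_le lines (i + 1)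
            rw [pvLoopB_skip lines kws inc lines.length (i + 1) (by omega) (by omega)
              (pvToks lines[i]!) k rows0 db]
            rw [← hstart]
            by_cases hst : start ≥ lines.length
            · -- block is empty and runs to EOF
              have hdj : pvGetDataLength i lines = ([], start) := by
                simp [pvGetDataLength, ← hstart, hst]
              have hdrop : lines.drop start = [] := List.drop_eq_nil_of_le hst
              rw [hdj, hdrop, pvLoopB]
              rw [pvLoopA]
              have hnlt : ¬ start < lines.length := by omega
              rw [dif_neg hnlt]
              norm_num
              cases inc <;> simp [hrows0]
            · push_neg at hst
              have hnb : pvToks lines[start]! ≠ [] :=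
                pvToks_ne_nil _ (by rw [← hstart] at *; exact pvGdlSkip_stop lines (i + 1) hst)
              have hdropS : lines.drop start = lines[start]! :: lines.drop (start + 1) := by
                rw [getElem!_pos lines start hst]; exact List.drop_eq_getElem_cons hst
              have hlenS : (pvToks lines[start]!).length ≠ 0 := by
                simpa [List.length_eq_zero_iff] using hnb
              rw [hdropS, pvLoopB]
              simp only [
                show ((1:Nat) == 0) = false from rfl, show ((1:Nat) == 1) = true from rfl,
                Bool.false_eq_true, if_false, if_true, if_pos hlenS]
              rw [pvLoopB_collect lines kws inc lines.length (start + 1) (by omega) (by omega)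
                (pvToks lines[start]!) k (rows0 ++ [pvToks lines[start]!]) db]
              have hnb' : ¬ pvToks lines[start] = [] := by
                rw [← getElem!_pos lines start hst]; exact hnb
              have hcol : pvGdlCollect lines start =
                  (pvToks lines[start]! :: (pvGdlCollect lines (start + 1)).1,
                    (pvGdlCollect lines (start + 1)).2) := by
                rw [pvGdlCollect.eq_def]; simp [hst, hnb', getElem!_pos lines start hst]
              have hdj : pvGetDataLength i lines =
                  (pvToks lines[start]! :: (pvGdlCollect lines (start + 1)).1,
                    (pvGdlCollect lines (start + 1)).2) := by
                rw [pvGetDataLength]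
                rw [← hstart]
                rw [if_neg (by omega), hcol]
              rw [hdj]
              set c := pvGdlCollect lines (start + 1) with hc
              have hc_ge : start + 1 ≤ c.2 := pvGdlCollect_le lines (start + 1)
              have hc_le : c.2 ≤ lines.length := pvGdlCollect_le_len lines (start + 1) (by omega)
              have hdata : (if inc then pvToks lines[i]! :: pvToks lines[start]! :: c.1
                  else pvToks lines[start]! :: c.1) = rows0 ++ [pvToks lines[start]!] ++ c.1 := by
                cases inc <;> simp [hrows0]
              simp only [hdata]
              by_cases hc2 : c.2 < lines.length
              · have hblank : pvToks lines[c.2]! = [] := by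
                  have := pvGdlCollect_stop lines (start + 1)
                  rw [← hc] at this
                  exact this hc2
                rw [if_pos hc2]
                rw [pvLoopA_blank lines kws inc c.2 _ hc2 hblank]
                have hih := ihm (c.2 + 1) (by omega) (by omega) k
                  (rows0 ++ [pvToks lines[start]!] ++ c.1)
                  (db.insert k (rows0 ++ [pvToks lines[start]!] ++ c.1))
                rw [hih]
                have hprevc : (if 0 < c.2 + 1 then pvToks lines[c.2 + 1 - 1]! else []) = [] := by
                  rw [if_pos (Nat.succ_pos c.2), Nat.add_sub_cancel]
                  exact hblank
                rw [hprevc]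
              · rw [if_neg hc2]
                rw [pvLoopA, dif_neg hc2]
        · rw [if_neg hf, if_neg hf]
          have := ihm (i + 1) (by omega) (by omega) kw rows db
          rw [hprev1] at this
          exact this
      · have hi : i = lines.length := by omega
        subst hi
        rw [pvLoopA]
        simp [List.drop_length, pvLoopB]

-- ===== VERDICT (by name: the statement is the Claim_ definition above) =====
theorem read_keywords_spec : Claim_equal_read_keywords := by
  intro lines keywords inc _hDom hPre
  unfold Spec_read_keywords read_keywords read_keywords_alt
  have := pvMain lines (pvKws keywords) inc hPre lines.length 0 (by omega) (by omega) "" []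
    PySem.Dict.empty
  simpa using congrArg PySem.Dict.items this
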